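-- pv_equiv track=rewrite | github.com/blopax/expert_system | old/expert_system.py | check_letters_in_a_row
-- ===== SOURCE A (Python) =====
-- def check_letters_in_a_row(line, i):
--     j = 0
--     while j < len(line) and line[j] != '#':
--         if line[j].isupper():
--             k = j + 1
--             while k < len(line) and line[k] != '#' and (line[k] == ' ' or line[k] == '\t'):
--                 k += 1
--             if k < len(line) and (line[k].isupper() or line[k] == '!' or line[k] == '('):
--                 print ("line : " + line + "\t\tError format: letter followed by letter, \"!\", or \"(\" at char: " + line[j])
--                 return False
--         j += 1
--     return True
-- ===== SOURCE B (Python) =====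
-- def check_letters_in_a_row(line, i):
--     head = line.split('#', 1)[0]
--     sig = [c for c in head if c != ' ' and c != '\t']
--     for a, b in zip(sig, sig[1:]):
--         if a.isupper() and (b.isupper() or b == '!' or b == '('):
--             print ("line : " + line + "\t\tError format: letter followed by letter, \"!\", or \"(\" at char: " + a)
--             return False
--     return True
-- ===== Notes on version B (the rewrite author's own statement) =====
-- stated objective: faster
-- what changed: B cuts the line at the first '#', filters out spaces/tabs in one pass, and does a flat scan over adjacent pairs of the remaining characters, replacing A's nested index loops whose inner whitespace-skipping lookahead rescans runs of blanks after every uppercase letter.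
import Mathlib
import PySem

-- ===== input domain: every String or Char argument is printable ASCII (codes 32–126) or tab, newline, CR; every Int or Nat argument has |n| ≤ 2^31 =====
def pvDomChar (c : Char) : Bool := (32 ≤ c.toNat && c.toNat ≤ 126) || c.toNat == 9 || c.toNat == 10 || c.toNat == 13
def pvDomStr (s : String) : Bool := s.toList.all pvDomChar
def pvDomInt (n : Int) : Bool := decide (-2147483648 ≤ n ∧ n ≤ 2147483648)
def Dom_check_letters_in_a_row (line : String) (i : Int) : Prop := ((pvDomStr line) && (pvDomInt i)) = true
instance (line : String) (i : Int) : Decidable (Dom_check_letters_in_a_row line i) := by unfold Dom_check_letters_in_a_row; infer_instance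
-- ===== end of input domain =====

-- B replaces A's nested index loops (inner whitespace-skipping lookahead) by: cut at first '#',
-- filter out ' '/'\t' once, then one flat scan over adjacent pairs; equivalence is about the
-- return value (both also print the identical message before returning False).

-- ASCII uppercase test, exactly Python's str.isupper on one ASCII letter (both ports use it)
def pvIsUp (c : Char) : Bool := 'A' ≤ c && c ≤ 'Z'

-- ===== PORT A =====
-- inner while loop: skip ' '/'\t' but stop at '#'; returns the char at index k (none = ran off the end)
def aLook : List Char → Option Char
  | [] => none
  | c :: cs => if c = '#' then some c else if c = ' ' ∨ c = '\t' then aLook cs else some c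

-- outer while loop over the suffix starting at j
def aLoop : List Char → Bool
  | [] => true
  | c :: cs =>
    if c = '#' then true
    else if pvIsUp c then
      match aLook cs with
      | some d => if pvIsUp d ∨ d = '!' ∨ d = '(' then false else aLoop cs
      | none => aLoop cs
    else aLoop cs

def check_letters_in_a_row (line : String) (_i : Int) : Bool := aLoop line.toList

-- ===== PORT B =====
-- the for loop over zip(sig, sig[1:]): adjacent pairs of the significant characters
def bPairs : List Char → Bool
  | a :: b :: rest =>
    if pvIsUp a && (pvIsUp b || b = '(' || b = '!') then false else bPairs (b :: rest)
  | _ => true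

def check_letters_in_a_row_alt (line : String) (_i : Int) : Bool :=
  bPairs ((line.toList.takeWhile (fun c => c ≠ '#')).filter (fun c => c ≠ ' ' ∧ c ≠ '\t'))

-- ===== PRECONDITION & SPEC =====
def Spec_check_letters_in_a_row (line : String) (i : Int) (out : Bool) : Prop := out = check_letters_in_a_row_alt line i
instance (line : String) (i : Int) (out : Bool) : Decidable (Spec_check_letters_in_a_row line i out) := by unfold Spec_check_letters_in_a_row; infer_instance

-- ===== CLAIM (what is proved, stated in full; the proofs are below) =====
def Claim_equal_check_letters_in_a_row : Prop := ∀ (line : String) (i : Int), Dom_check_letters_in_a_row line i → Spec_check_letters_in_a_row line i (check_letters_in_a_row line i)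

-- ===== LEMMAS AND PROOFS =====

-- the significant characters of the suffix cs (what B scans)
def sig (cs : List Char) : List Char :=
  (cs.takeWhile (fun c => c ≠ '#')).filter (fun c => c ≠ ' ' ∧ c ≠ '\t')

-- A's lookahead vs. the head of B's significant list
theorem aLook_sig (cs : List Char) :
    (sig cs = [] ∧ (aLook cs = none ∨ aLook cs = some '#')) ∨
    (∃ d rest, sig cs = d :: rest ∧ aLook cs = some d ∧ d ≠ '#') := by
  induction cs with
  | nil => left; exact ⟨rfl, Or.inl rfl⟩
  | cons c cs ih =>
    by_cases hh : c = '#'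
    · left; subst hh; exact ⟨by simp [sig], Or.inr (by simp [aLook])⟩
    · by_cases hw : c = ' ' ∨ c = '\t'
      · have hs : sig (c :: cs) = sig cs := by
          rcases hw with hw | hw <;> subst hw <;> simp [sig, hh]
        have hl : aLook (c :: cs) = aLook cs := by simp [aLook, hh, hw]
        rw [hs, hl]; exact ih
      · right
        push Not at hw
        refine ⟨c, sig cs, ?_, ?_, hh⟩
        · simp [sig, hh, hw.1, hw.2]
        · simp [aLook, hh, hw]

-- dropping a non-uppercase head does not change B's pair scan
theorem bPairs_cons_notUp {a : Char} (l : List Char) (ha : pvIsUp a = false) :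
    bPairs (a :: l) = bPairs l := by
  cases l with
  | nil => rfl
  | cons b rest => simp [bPairs, ha]

theorem aLoop_eq_bPairs_sig (cs : List Char) : aLoop cs = bPairs (sig cs) := by
  induction cs with
  | nil => rfl
  | cons c cs ih =>
    by_cases hh : c = '#'
    · subst hh; simp [aLoop, sig]; rfl
    · by_cases hw : c = ' ' ∨ c = '\t'
      · have hs : sig (c :: cs) = sig cs := by
          rcases hw with hw | hw <;> subst hw <;> simp [sig, hh]
        have hu : pvIsUp c = false := by
          rcases hw with hw | hw <;> subst hw <;> decide
        rw [hs, ← ih]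
        simp [aLoop, hh, hu]
      · push Not at hw
        have hs : sig (c :: cs) = c :: sig cs := by simp [sig, hh, hw.1, hw.2]
        rw [hs]
        by_cases hu : pvIsUp c = true
        · rcases aLook_sig cs with ⟨h0, hl⟩ | ⟨d, rest, h0, hl, hd⟩
          · have : aLoop (c :: cs) = aLoop cs := by
              rcases hl with hl | hl <;> simp [aLoop, hh, hl, pvIsUp]
            rw [this, ih, h0]; rfl
          · rw [h0]
            by_cases hb : pvIsUp d ∨ d = '!' ∨ d = '('
            · have hA : aLoop (c :: cs) = false := by
                simp [aLoop, hh, hu, hl, hb]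
              have hB : bPairs (c :: d :: rest) = false := by
                have : (pvIsUp c && (pvIsUp d || d = '(' || d = '!')) = true := by
                  rcases hb with hb | hb | hb <;> simp [hu, hb]
                simp [bPairs, this]
              rw [hA, hB]
            · push Not at hb
              have hA : aLoop (c :: cs) = aLoop cs := by
                simp [aLoop, hh, hu, hl, hb.1, hb.2.1, hb.2.2]
              have hB : bPairs (c :: d :: rest) = bPairs (d :: rest) := by
                have : (pvIsUp c && (pvIsUp d || d = '(' || d = '!')) = false := by
                  simp [hb.1, hb.2.1, hb.2.2]
                simp [bPairs, this]
              rw [hA, hB, ← h0, ih]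
        · have hu' : pvIsUp c = false := by simpa using hu
          rw [bPairs_cons_notUp _ hu', ← ih]
          simp [aLoop, hh, hu']

-- ===== VERDICT (by name: the statement is the Claim_ definition above) =====
theorem check_letters_in_a_row_spec : Claim_equal_check_letters_in_a_row := by
  intro line i _
  unfold Spec_check_letters_in_a_row check_letters_in_a_row check_letters_in_a_row_alt
  exact aLoop_eq_bPairs_sig line.toList
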